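-- pv_equiv track=rewrite | github.com/alxdofficial/openclaw-memoriesai | src/agentic_computer_use/configure/io.py | _rewrite_unit_env
-- ===== SOURCE A (Python) =====
-- def _rewrite_unit_env(unit_text: str, env: dict[str, str]) -> str:
--     """Replace every `Environment=` block with a fresh one, preserving everything else."""
--     lines = unit_text.splitlines(keepends=True)
--     out: list[str] = []
--     inserted = False
--     in_service = False
--     for line in lines:
--         stripped = line.strip()
--         if stripped == "[Service]":
--             in_service = True
--             out.append(line)
--             for k, v in env.items():
--                 out.append(f"Environment={k}={v}\n")
--             inserted = True
--             continue
--         if stripped.startswith("[") and stripped.endswith("]"):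
--             in_service = False
--         if in_service and stripped.startswith("Environment="):
--             continue  # drop existing; already rewrote above
--         out.append(line)
--     if not inserted:
--         # No [Service] section found — fall back to appending at top
--         block = "[Service]\n" + "".join(f"Environment={k}={v}\n" for k, v in env.items())
--         return block + unit_text
--     return "".join(out)
-- ===== SOURCE B (Python) =====
-- def _rewrite_unit_env(unit_text: str, env: dict[str, str]) -> str:
--     """Group lines by section headers, then rewrite the [Service] groups."""
--     lines = unit_text.splitlines(keepends=True)
--     env_block = [f"Environment={k}={v}\n" for k, v in env.items()]
--
--     def _is_header(line: str) -> bool: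
--         s = line.strip()
--         return s.startswith("[") and s.endswith("]")
--
--     pre: list[str] = []
--     groups: list[list[str]] = []
--     for line in lines:
--         if _is_header(line):
--             groups.append([line])
--         else:
--             (groups[-1] if groups else pre).append(line)
--
--     if not any(g[0].strip() == "[Service]" for g in groups):
--         block = "[Service]\n" + "".join(env_block)
--         return block + unit_text
--
--     out: list[str] = list(pre)
--     for g in groups:
--         if g[0].strip() == "[Service]":
--             out.append(g[0])
--             out.extend(env_block)
--             out.extend(l for l in g[1:] if not l.strip().startswith("Environment="))
--         else:
--             out.extend(g)
--     return "".join(out)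
-- ===== Notes on version B (the rewrite author's own statement) =====
-- stated objective: alternative
-- what changed: B first partitions the lines into a preamble plus header-led groups in one grouping pass, then renders each group (inserting the fresh Environment block and filtering old Environment= lines in every [Service] group), instead of A's single pass driven by inserted/in_service state flags.
import Mathlib
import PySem

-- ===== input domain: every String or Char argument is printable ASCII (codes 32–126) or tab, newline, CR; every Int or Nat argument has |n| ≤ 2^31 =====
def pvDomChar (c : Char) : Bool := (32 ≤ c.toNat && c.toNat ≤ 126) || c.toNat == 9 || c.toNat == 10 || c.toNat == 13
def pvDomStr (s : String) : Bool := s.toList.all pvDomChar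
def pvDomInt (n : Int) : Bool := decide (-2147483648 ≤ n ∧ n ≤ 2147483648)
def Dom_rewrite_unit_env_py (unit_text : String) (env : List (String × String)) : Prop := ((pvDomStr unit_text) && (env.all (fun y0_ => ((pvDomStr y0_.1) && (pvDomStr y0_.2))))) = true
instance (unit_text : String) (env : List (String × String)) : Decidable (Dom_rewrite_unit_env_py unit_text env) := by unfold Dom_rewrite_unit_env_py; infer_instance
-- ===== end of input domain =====

-- B regroups the unit file into header-led sections first and then rewrites each
-- [Service] group, instead of A's one-pass state machine; same cost, different decomposition.

-- ----- shared primitive ports (Python builtins both programs call identically) -----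

-- str.splitlines(keepends=True); exact on Dom (the only line terminators in Dom are '\n', '\r', '\r\n')
def pvSplitKeepAux : List Char → List Char → List (List Char)
  | acc, [] => if acc.isEmpty then [] else [acc.reverse]
  | acc, '\r' :: '\n' :: rest => (acc.reverse ++ ['\r', '\n']) :: pvSplitKeepAux [] rest
  | acc, c :: rest =>
      if c == '\n' || c == '\r' then (acc.reverse ++ [c]) :: pvSplitKeepAux [] rest
      else pvSplitKeepAux (c :: acc) rest

def pvSplitKeep (s : String) : List (List Char) := pvSplitKeepAux [] s.toList

-- env is a Python dict: build it by insertion and take items() in insertion order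
def pvEnvItems (env : List (String × String)) : List (String × String) :=
  (env.foldl (fun d p => d.insert p.1 p.2) (PySem.Dict.empty)).items

-- the f"Environment={k}={v}\n" lines, in env.items() order
def pvEnvBlock (env : List (String × String)) : List (List Char) :=
  (pvEnvItems env).map (fun p => "Environment=".toList ++ p.1.toList ++ "=".toList ++ p.2.toList ++ ['\n'])

-- the shared no-[Service] fallback: "[Service]\n" + "".join(env lines) + unit_text
def pvFallback (unit_text : String) (env : List (String × String)) : String :=
  String.ofList ("[Service]\n".toList ++ PySem.Chars.join [] (pvEnvBlock env) ++ unit_text.toList)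

def pvSvc (l : List Char) : Bool := PySem.Chars.strip l == "[Service]".toList
def pvHdr (l : List Char) : Bool :=
  PySem.Chars.startswith (PySem.Chars.strip l) "[".toList &&
  PySem.Chars.endswith (PySem.Chars.strip l) "]".toList
def pvEnvLine (l : List Char) : Bool := PySem.Chars.startswith (PySem.Chars.strip l) "Environment=".toList

-- ===== PORT A =====
-- A's loop state: (out, inserted, in_service)
def pvStepA (envBlock : List (List Char)) (st : List (List Char) × Bool × Bool) (line : List Char) :
    List (List Char) × Bool × Bool :=
  if pvSvc line then (st.1 ++ [line] ++ envBlock, true, true)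
  else
    let sv := if pvHdr line then false else st.2.2
    if sv && pvEnvLine line then (st.1, st.2.1, sv)
    else (st.1 ++ [line], st.2.1, sv)

def rewrite_unit_env_py (unit_text : String) (env : List (String × String)) : String :=
  let lines := pvSplitKeep unit_text
  let r := lines.foldl (pvStepA (pvEnvBlock env)) ([], false, false)
  if !r.2.1 then pvFallback unit_text env
  else String.ofList (PySem.Chars.join [] r.1)

-- ===== PORT B =====
-- B's grouping pass: state (pre, groups-in-reverse); each group is (header line, body lines)
def pvStepB (st : List (List Char) × List (List Char × List (List Char))) (line : List Char) :
    List (List Char) × List (List Char × List (List Char)) :=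
  if pvHdr line then (st.1, (line, []) :: st.2)
  else
    match st.2 with
    | [] => (st.1 ++ [line], [])
    | (h, b) :: t => (st.1, (h, b ++ [line]) :: t)

def pvRender (envBlock : List (List Char)) (g : List Char × List (List Char)) : List (List Char) :=
  if pvSvc g.1 then g.1 :: (envBlock ++ g.2.filter (fun l => !pvEnvLine l))
  else g.1 :: g.2

def rewrite_unit_env_py_alt (unit_text : String) (env : List (String × String)) : String :=
  let lines := pvSplitKeep unit_text
  let envBlock := pvEnvBlock env
  let st := lines.foldl pvStepB ([], [])
  let groups := st.2.reverse
  if !(groups.any (fun g => pvSvc g.1)) then pvFallback unit_text env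
  else String.ofList (PySem.Chars.join [] (st.1 ++ groups.flatMap (pvRender envBlock)))

-- ===== PRECONDITION & SPEC =====
def Spec_rewrite_unit_env_py (unit_text : String) (env : List (String × String)) (out : String) : Prop := out = rewrite_unit_env_py_alt unit_text env
instance (unit_text : String) (env : List (String × String)) (out : String) : Decidable (Spec_rewrite_unit_env_py unit_text env out) := by unfold Spec_rewrite_unit_env_py; infer_instance

-- ===== CLAIM (what is proved, stated in full; the proofs are below) =====
def Claim_equal_rewrite_unit_env_py : Prop := ∀ (unit_text : String) (env : List (String × String)), Dom_rewrite_unit_env_py unit_text env → Spec_rewrite_unit_env_py unit_text env (rewrite_unit_env_py unit_text env)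

-- ===== LEMMAS AND PROOFS =====

-- recursive characterisation of A's output list
def pvFA (envBlock : List (List Char)) : List (List Char) → Bool → List (List Char)
  | [], _ => []
  | l :: r, sv =>
    if pvSvc l then l :: (envBlock ++ pvFA envBlock r true)
    else
      let sv2 := if pvHdr l then false else sv
      if sv2 && pvEnvLine l then pvFA envBlock r sv2 else l :: pvFA envBlock r sv2

-- recursive characterisation of A's final in_service flag
def pvSV : List (List Char) → Bool → Bool
  | [], sv => sv
  | l :: r, sv => pvSV r (if pvSvc l then true else if pvHdr l then false else sv)

-- span-based characterisation of B's groups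
def pvGrp : List (List Char) → List (List Char × List (List Char))
  | [] => []
  | h :: r => (h, r.takeWhile (fun l => !pvHdr l)) :: pvGrp (r.dropWhile (fun l => !pvHdr l))
  termination_by l => l.length
  decreasing_by
    simp only [List.length_cons]
    exact Nat.lt_succ_of_le (List.length_dropWhile_le _ _)

theorem pvSvc_imp_hdr {l : List Char} (h : pvSvc l = true) : pvHdr l = true := by
  unfold pvSvc at h
  unfold pvHdr
  rw [eq_of_beq h]
  decide

theorem foldA_eq (eb : List (List Char)) (lines : List (List Char)) :
    ∀ out ins sv, lines.foldl (pvStepA eb) (out, ins, sv) =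
      (out ++ pvFA eb lines sv, ins || lines.any pvSvc, pvSV lines sv) := by
  induction lines with
  | nil => intro out ins sv; simp [pvFA, pvSV]
  | cons l r ih =>
    intro out ins sv
    by_cases h1 : pvSvc l = true
    · simp [pvStepA, pvFA, pvSV, h1, ih]
    · simp only [Bool.not_eq_true] at h1
      by_cases h2 : pvHdr l = true
      · simp [pvStepA, pvFA, pvSV, h1, h2, ih]
      · simp only [Bool.not_eq_true] at h2
        by_cases h3 : (sv && pvEnvLine l) = true
        · simp [pvStepA, pvFA, pvSV, h1, h2, h3, ih]
        · simp only [Bool.not_eq_true] at h3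
          simp [pvStepA, pvFA, pvSV, h1, h2, h3, ih]

-- B's grouping fold, state with a live current group
theorem foldB_cons (lines : List (List Char)) :
    ∀ pre h b t, lines.foldl pvStepB (pre, (h, b) :: t) =
      (pre, (pvGrp (lines.dropWhile (fun l => !pvHdr l))).reverse ++
            (h, b ++ lines.takeWhile (fun l => !pvHdr l)) :: t) := by
  induction lines with
  | nil => intro pre h b t; simp [pvGrp]
  | cons l r ih =>
    intro pre h b t
    by_cases hh : pvHdr l = true
    · simp only [List.foldl_cons, pvStepB, hh, if_pos]
      rw [ih]
      simp [hh, pvGrp]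
    · simp only [Bool.not_eq_true] at hh
      simp only [List.foldl_cons, pvStepB, hh, Bool.false_eq_true, if_false]
      rw [ih]
      simp [hh, List.append_assoc]

theorem foldB_nil (lines : List (List Char)) :
    ∀ pre, lines.foldl pvStepB (pre, []) =
      (pre ++ lines.takeWhile (fun l => !pvHdr l),
       (pvGrp (lines.dropWhile (fun l => !pvHdr l))).reverse) := by
  induction lines with
  | nil => intro pre; simp [pvGrp]
  | cons l r ih =>
    intro pre
    by_cases hh : pvHdr l = true
    · simp only [List.foldl_cons, pvStepB, hh, if_pos]
      rw [foldB_cons]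
      simp [hh, pvGrp]
    · simp only [Bool.not_eq_true] at hh
      simp only [List.foldl_cons, pvStepB, hh, Bool.false_eq_true, if_false]
      rw [ih]
      simp [hh, List.append_assoc]

-- headerHeaded r: r is empty or starts with a header line
def pvHH (r : List (List Char)) : Prop := r = [] ∨ ∃ h t, r = h :: t ∧ pvHdr h = true

theorem pvHH_dropWhile (r : List (List Char)) : pvHH (r.dropWhile (fun l => !pvHdr l)) := by
  cases hd : r.dropWhile (fun l => !pvHdr l) with
  | nil => exact Or.inl rfl
  | cons x xs =>
    right
    refine ⟨x, xs, rfl, ?_⟩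
    have := List.head_dropWhile_not (fun l => !pvHdr l) (l := r) (by simp [hd])
    simp [hd] at this
    exact this

-- sv is irrelevant at a header-headed (or empty) list
theorem pvFA_hh (eb : List (List Char)) {r : List (List Char)} (h : pvHH r) :
    pvFA eb r true = pvFA eb r false := by
  rcases h with rfl | ⟨x, xs, rfl, hx⟩
  · rfl
  · by_cases hs : pvSvc x = true
    · simp [pvFA, hs]
    · simp only [Bool.not_eq_true] at hs
      simp [pvFA, hs, hx]

-- non-header lines with in_service = False pass through unchanged
theorem pvFA_pre (eb : List (List Char)) (ls : List (List Char))
    (hls : ∀ l ∈ ls, pvHdr l = false) (r : List (List Char)) :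
    pvFA eb (ls ++ r) false = ls ++ pvFA eb r false := by
  induction ls with
  | nil => simp
  | cons x xs ih =>
    have hx : pvHdr x = false := hls x (by simp)
    have hs : pvSvc x = false := by
      cases h : pvSvc x
      · rfl
      · exact absurd (pvSvc_imp_hdr h) (by simp [hx])
    simp only [List.cons_append, pvFA, hs, hx]
    simp [ih (fun l hl => hls l (by simp [hl]))]

-- non-header lines with in_service = True: Environment= lines are dropped
theorem pvFA_body (eb : List (List Char)) (ls : List (List Char))
    (hls : ∀ l ∈ ls, pvHdr l = false) (r : List (List Char)) (hr : pvHH r) :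
    pvFA eb (ls ++ r) true = ls.filter (fun l => !pvEnvLine l) ++ pvFA eb r false := by
  induction ls with
  | nil => simpa using pvFA_hh eb hr
  | cons x xs ih =>
    have hx : pvHdr x = false := hls x (by simp)
    have hs : pvSvc x = false := by
      cases h : pvSvc x
      · rfl
      · exact absurd (pvSvc_imp_hdr h) (by simp [hx])
    have ih' := ih (fun l hl => hls l (by simp [hl]))
    by_cases he : pvEnvLine x = true
    · simp only [List.cons_append, pvFA, hs, hx]
      simp [he, ih']
    · simp only [Bool.not_eq_true] at he
      simp only [List.cons_append, pvFA, hs, hx]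
      simp [he, ih']

theorem takeWhile_not_hdr (r : List (List Char)) :
    ∀ l ∈ r.takeWhile (fun l => !pvHdr l), pvHdr l = false := by
  intro l hl
  have := List.mem_takeWhile_imp hl
  simpa using this

-- main: on a header-headed list, A's recursion equals B's group rendering
theorem pvFA_eq_grp (eb : List (List Char)) :
    ∀ n r, r.length ≤ n → pvHH r →
      pvFA eb r false = (pvGrp r).flatMap (pvRender eb) := by
  intro n
  induction n with
  | zero =>
    intro r hlen hh
    have : r = [] := List.length_eq_zero_iff.mp (Nat.le_zero.mp hlen)
    subst this; simp [pvFA, pvGrp]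
  | succ n ih =>
    intro r hlen hh
    rcases hh with rfl | ⟨h, t, rfl, hh⟩
    · simp [pvFA, pvGrp]
    · have hsplit : t.takeWhile (fun l => !pvHdr l) ++ t.dropWhile (fun l => !pvHdr l) = t :=
        List.takeWhile_append_dropWhile
      have hdw : pvHH (t.dropWhile (fun l => !pvHdr l)) := pvHH_dropWhile t
      have hlen' : (t.dropWhile (fun l => !pvHdr l)).length ≤ n := by
        have h1 := List.length_dropWhile_le (fun l => !pvHdr l) t
        simp only [List.length_cons] at hlen
        omega
      have ihdw := ih _ hlen' hdw
      by_cases hs : pvSvc h = true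
      · have hb := pvFA_body eb (t.takeWhile (fun l => !pvHdr l)) (takeWhile_not_hdr t)
          (t.dropWhile (fun l => !pvHdr l)) hdw
        rw [hsplit] at hb
        simp only [pvFA, hs, if_pos]
        rw [hb, ihdw]
        simp [pvGrp, pvRender, hs]
      · simp only [Bool.not_eq_true] at hs
        have hp := pvFA_pre eb (t.takeWhile (fun l => !pvHdr l)) (takeWhile_not_hdr t)
          (t.dropWhile (fun l => !pvHdr l))
        rw [hsplit] at hp
        simp only [pvFA, hs, hh, Bool.false_eq_true, if_false, if_true, Bool.false_and]
        rw [hp, ihdw]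
        simp [pvGrp, pvRender, hs]

-- A's `inserted` flag equals B's any-Service-group test
theorem any_svc_eq_grp :
    ∀ n r, r.length ≤ n → pvHH r →
      r.any pvSvc = (pvGrp r).any (fun g => pvSvc g.1) := by
  intro n
  induction n with
  | zero =>
    intro r hlen _
    have : r = [] := List.length_eq_zero_iff.mp (Nat.le_zero.mp hlen)
    subst this; simp [pvGrp]
  | succ n ih =>
    intro r hlen hh
    rcases hh with rfl | ⟨h, t, rfl, _⟩
    · simp [pvGrp]
    · have hlen' : (t.dropWhile (fun l => !pvHdr l)).length ≤ n := by
        have h1 := List.length_dropWhile_le (fun l => !pvHdr l) t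
        simp only [List.length_cons] at hlen
        omega
      have ihdw := ih _ hlen' (pvHH_dropWhile t)
      have htw : (t.takeWhile (fun l => !pvHdr l)).any pvSvc = false := by
        simp only [List.any_eq_false]
        intro l hl
        cases h2 : pvSvc l
        · simp
        · exact absurd (pvSvc_imp_hdr h2) (by simp [takeWhile_not_hdr t l hl])
      have ht : t.any pvSvc = (t.dropWhile (fun l => !pvHdr l)).any pvSvc := by
        conv_lhs => rw [← List.takeWhile_append_dropWhile (p := fun l => !pvHdr l) (l := t)]
        rw [List.any_append, htw, Bool.false_or]
      rw [List.any_cons, ht]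
      simp only [pvGrp, List.any_cons]
      rw [ihdw]

theorem any_svc_top (lines : List (List Char)) :
    lines.any pvSvc = (pvGrp (lines.dropWhile (fun l => !pvHdr l))).any (fun g => pvSvc g.1) := by
  have htw : (lines.takeWhile (fun l => !pvHdr l)).any pvSvc = false := by
    simp only [List.any_eq_false]
    intro l hl
    cases h2 : pvSvc l
    · simp
    · exact absurd (pvSvc_imp_hdr h2) (by simp [takeWhile_not_hdr lines l hl])
  conv_lhs => rw [← List.takeWhile_append_dropWhile (p := fun l => !pvHdr l) (l := lines)]
  rw [List.any_append, htw, Bool.false_or]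
  exact any_svc_eq_grp _ _ le_rfl (pvHH_dropWhile lines)

-- ===== VERDICT (by name: the statement is the Claim_ definition above) =====
theorem rewrite_unit_env_py_spec : Claim_equal_rewrite_unit_env_py := by
  intro unit_text env _
  unfold Spec_rewrite_unit_env_py rewrite_unit_env_py rewrite_unit_env_py_alt
  simp only
  set lines := pvSplitKeep unit_text with hl
  set eb := pvEnvBlock env with he
  rw [foldA_eq, foldB_nil]
  simp only [Bool.false_or, List.reverse_reverse, List.nil_append]
  have hany := any_svc_top lines
  rw [hany]
  by_cases hc : (pvGrp (lines.dropWhile (fun l => !pvHdr l))).any (fun g => pvSvc g.1) = true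
  · simp only [hc, Bool.not_true, Bool.false_eq_true, if_false]
    have hfa : pvFA eb lines false =
        lines.takeWhile (fun l => !pvHdr l) ++
        (pvGrp (lines.dropWhile (fun l => !pvHdr l))).flatMap (pvRender eb) := by
      conv_lhs => rw [← List.takeWhile_append_dropWhile (p := fun l => !pvHdr l) (l := lines)]
      rw [pvFA_pre eb _ (takeWhile_not_hdr lines)]
      rw [pvFA_eq_grp eb _ _ le_rfl (pvHH_dropWhile lines)]
    rw [hfa]
  · simp only [Bool.not_eq_true] at hc
    simp [hc]
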